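-- pv_equiv track=rewrite | github.com/Batosta/FEUP-IART | Teste 2 TC/Teste 2 TC/n_line.py | createSol
-- ===== SOURCE A (Python) =====
-- def createSol(n):
--     i = 1
--     solution = []
--     while len(solution) < n:
--         col = []
--         while len(col) < n:
--             col.append(i)
--             i += 1
--         solution.append(col)
--     solution[n-1][n-1] = 0
--     return solution
-- ===== SOURCE B (Python) =====
-- def createSol(n):
--     nums = list(range(1, n * n))
--     nums.append(0)
--     return [nums[r * n:(r + 1) * n] for r in range(n)]
-- ===== Notes on version B (the rewrite author's own statement) =====
-- stated objective: simpler
-- what changed: B builds the whole flat sequence 1..n*n-1 once (with the trailing 0 appended directly) and reshapes it into rows by slicing, instead of threading a running counter through nested while loops and patching the last cell afterwards.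
-- outside the precondition, e.g. on createSol(0): A raises IndexError, B returns []
import Mathlib
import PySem

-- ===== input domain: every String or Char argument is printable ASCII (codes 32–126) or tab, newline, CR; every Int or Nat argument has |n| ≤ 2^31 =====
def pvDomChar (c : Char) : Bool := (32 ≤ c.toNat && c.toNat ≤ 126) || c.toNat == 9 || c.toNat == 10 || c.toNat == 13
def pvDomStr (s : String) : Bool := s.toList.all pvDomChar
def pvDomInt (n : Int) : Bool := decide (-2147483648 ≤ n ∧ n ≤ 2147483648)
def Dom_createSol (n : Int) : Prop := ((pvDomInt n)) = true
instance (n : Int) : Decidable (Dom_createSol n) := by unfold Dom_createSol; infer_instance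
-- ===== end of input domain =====

-- B builds the flat sequence 1..n*n-1 plus a trailing 0 once and reshapes it into rows by
-- slicing, instead of A's nested while loops threading a running counter (objective: simpler).

-- ===== PORT A =====
-- inner while loop 'while len(col) < n: col.append(i); i += 1', recursing on the remaining
-- trip count (n - len(col)).toNat — a totalization guard only, the loop body is unchanged
def aInnerLoop : Nat → Int → List Int → List Int × Int
  | 0, i, col => (col, i)
  | k + 1, i, col => aInnerLoop k (i + 1) (col ++ [i])

-- outer while loop 'while len(solution) < n: <inner loop on fresh col>; solution.append(col)'
def aOuterLoop : Nat → Int → Int → List (List Int) → List (List Int)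
  | 0, _, _, sol => sol
  | k + 1, n, i, sol =>
    let p := aInnerLoop n.toNat i []
    aOuterLoop k n p.2 (sol ++ [p.1])

def createSol (n : Int) : List (List Int) :=
  let sol := aOuterLoop n.toNat n 1 []
  -- 'solution[n-1][n-1] = 0': pyGet?/pySet? return none exactly where Python raises IndexError
  -- (n ≤ 0, excluded by Pre_); the 'none' branches are unreachable inside Pre_.
  match PySem.List.pyGet? sol (n - 1) with
  | none => sol
  | some row =>
    match PySem.List.pySet? row (n - 1) 0 with
    | none => sol
    | some row' => (PySem.List.pySet? sol (n - 1) row').getD sol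

-- ===== PORT B =====
def createSol_alt (n : Int) : List (List Int) :=
  let nums := PySem.List.pyRange 1 (n * n) 1 ++ [0]
  (PySem.List.pyRange 0 n 1).map (fun r => PySem.List.slice nums (some (r * n)) (some ((r + 1) * n)))

-- ===== PRECONDITION & SPEC =====
-- A raises IndexError on n ≤ 0 (the final 'solution[n-1][n-1] = 0' indexes the empty list).
def Pre_createSol (n : Int) : Prop := 1 ≤ n
instance (n : Int) : Decidable (Pre_createSol n) := by unfold Pre_createSol; infer_instance
def pvWitness_createSol : Int := 3

def Spec_createSol (n : Int) (out : List (List Int)) : Prop := out = createSol_alt n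
instance (n : Int) (out : List (List Int)) : Decidable (Spec_createSol n out) := by unfold Spec_createSol; infer_instance

-- ===== CLAIM (what is proved, stated in full; the proofs are below) =====
def Claim_equal_createSol : Prop := ∀ (n : Int), Dom_createSol n → Pre_createSol n → Spec_createSol n (createSol n)

-- ===== LEMMAS AND PROOFS =====

-- the inner loop appends range(i, i+k) where k is its trip count
lemma aInnerLoop_eq (k : Nat) : ∀ (i : Int) (col : List Int),
    aInnerLoop k i col = (col ++ PySem.List.pyRange i (i + k) 1, i + k) := by
  induction k with
  | zero =>
    intro i col
    simp [aInnerLoop, PySem.List.pyRange_one_eq_nil]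
  | succ k ih =>
    intro i col
    rw [aInnerLoop, ih (i + 1) (col ++ [i])]
    have e1 : i + 1 + (k : Int) = i + ((k + 1 : Nat) : Int) := by push_cast; ring
    rw [e1, List.append_assoc]
    congr 1
    rw [List.singleton_append, ← PySem.List.pyRange_one_cons (by push_cast; omega)]

-- rows produced by the outer loop, starting at counter i, k rows to go
def rowsP (n : Int) : Int → Nat → List (List Int)
  | _, 0 => []
  | i, k + 1 => PySem.List.pyRange i (i + n) 1 :: rowsP n (i + n) k

lemma aOuterLoop_eq (k : Nat) : ∀ (n i : Int) (sol : List (List Int)), 0 ≤ n →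
    aOuterLoop k n i sol = sol ++ rowsP n i k := by
  induction k with
  | zero => intro n i sol _; simp [aOuterLoop, rowsP]
  | succ k ih =>
    intro n i sol hn
    have hcast : (n.toNat : Int) = n := by omega
    rw [aOuterLoop]
    simp only [aInnerLoop_eq n.toNat i [], List.nil_append]
    rw [ih n (i + n.toNat) (sol ++ [PySem.List.pyRange i (i + n.toNat) 1]) hn, hcast]
    simp [rowsP]

lemma rowsP_eq_map (n : Int) : ∀ (k : Nat) (i : Int),
    rowsP n i k = (List.range k).map (fun (r : Nat) => PySem.List.pyRange (i + (r : Int) * n) (i + (r : Int) * n + n) 1) := by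
  intro k
  induction k with
  | zero => intro i; simp [rowsP]
  | succ k ih =>
    intro i
    rw [List.range_succ_eq_map]
    simp only [rowsP, ih (i + n), List.map_cons, List.map_map]
    congr 1
    · norm_num
    · apply List.map_congr_left; intro r _
      simp only [Function.comp_apply]
      push_cast; ring_nf

-- everything below is stated over n = ↑m, m ≥ 1
lemma createSol_closed (m : Nat) (hm : 1 ≤ m) :
    createSol (m : Int) =
      ((List.range m).map (fun (r : Nat) => PySem.List.pyRange (1 + (r : Int) * (m : Int)) (1 + (r : Int) * (m : Int) + (m : Int)) 1)).set
        (m - 1) ((PySem.List.pyRange (1 + ((m - 1 : Nat) : Int) * (m : Int)) (1 + ((m - 1 : Nat) : Int) * (m : Int) + (m : Int)) 1).set (m - 1) 0) := by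
  have hm1 : (m : Int) - 1 = ((m - 1 : Nat) : Int) := by omega
  have hrowlen : (PySem.List.pyRange (1 + ((m - 1 : Nat) : Int) * (m : Int)) (1 + ((m - 1 : Nat) : Int) * (m : Int) + (m : Int)) 1).length = m := by
    rw [PySem.List.length_pyRange_one]
    have h : (1 + ((m - 1 : Nat) : Int) * (m : Int) + (m : Int)) - (1 + ((m - 1 : Nat) : Int) * (m : Int)) = ((m : Nat) : Int) := by ring
    rw [h, Int.toNat_natCast]
  have hsol : aOuterLoop ((m : Int)).toNat (m : Int) 1 [] =
      (List.range m).map (fun (r : Nat) => PySem.List.pyRange (1 + (r : Int) * (m : Int)) (1 + (r : Int) * (m : Int) + (m : Int)) 1) := by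
    rw [aOuterLoop_eq ((m : Int)).toNat (m : Int) 1 [] (by omega)]
    simp only [Int.toNat_natCast, List.nil_append]
    rw [rowsP_eq_map]
  have hget : PySem.List.pyGet?
      ((List.range m).map (fun (r : Nat) => PySem.List.pyRange (1 + (r : Int) * (m : Int)) (1 + (r : Int) * (m : Int) + (m : Int)) 1)) ((m : Int) - 1)
      = some (PySem.List.pyRange (1 + ((m - 1 : Nat) : Int) * (m : Int)) (1 + ((m - 1 : Nat) : Int) * (m : Int) + (m : Int)) 1) := by
    rw [hm1, PySem.List.pyGet?_natCast]
    simp [List.getElem?_map, List.getElem?_range (show m - 1 < m by omega)]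
  have hset1 : PySem.List.pySet?
      (PySem.List.pyRange (1 + ((m - 1 : Nat) : Int) * (m : Int)) (1 + ((m - 1 : Nat) : Int) * (m : Int) + (m : Int)) 1) ((m : Int) - 1) 0
      = some ((PySem.List.pyRange (1 + ((m - 1 : Nat) : Int) * (m : Int)) (1 + ((m - 1 : Nat) : Int) * (m : Int) + (m : Int)) 1).set (m - 1) 0) := by
    rw [hm1]
    exact PySem.List.pySet?_natCast _ _ _ (by rw [hrowlen]; omega)
  have hset2 : ∀ (row' : List Int), PySem.List.pySet?
      ((List.range m).map (fun (r : Nat) => PySem.List.pyRange (1 + (r : Int) * (m : Int)) (1 + (r : Int) * (m : Int) + (m : Int)) 1)) ((m : Int) - 1) row'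
      = some (((List.range m).map (fun (r : Nat) => PySem.List.pyRange (1 + (r : Int) * (m : Int)) (1 + (r : Int) * (m : Int) + (m : Int)) 1)).set (m - 1) row') := by
    intro row'
    rw [hm1]
    exact PySem.List.pySet?_natCast _ _ _ (by simp; omega)
  unfold createSol
  simp only [hsol, hget, hset1, hset2, Option.getD_some]

lemma createSol_alt_closed (m : Nat) :
    createSol_alt (m : Int) =
      (List.range m).map (fun (r : Nat) => PySem.List.slice (PySem.List.pyRange 1 ((m : Int) * m) 1 ++ [0]) (some ((r : Int) * m)) (some (((r : Int) + 1) * m))) := by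
  unfold createSol_alt
  rw [PySem.List.pyRange_zero_natCast, List.map_map]
  rfl

lemma main_eq (m : Nat) (hm : 1 ≤ m) : createSol (m : Int) = createSol_alt (m : Int) := by
  have hmm : (m : Int) * m = ((m * m : Nat) : Int) := by push_cast; ring
  rw [createSol_closed m hm, createSol_alt_closed m, hmm]
  apply List.ext_getElem
  · simp
  intro r h1 h2
  simp only [List.length_set, List.length_map, List.length_range] at h1
  simp only [List.getElem_set, List.getElem_map, List.getElem_range]
  -- rewrite B's slice bounds to Nat casts and unfold the slice to drop/take
  have hcast1 : ((r : Int) * m) = ((r * m : Nat) : Int) := by push_cast; ring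
  have hcast2 : (((r : Int) + 1) * m) = ((r * m + m : Nat) : Int) := by push_cast; ring
  rw [hcast1, hcast2, PySem.List.slice_natCast]
  have htake : r * m + m - r * m = m := by omega
  rw [htake]
  -- split off the first r*m elements
  have hn1 : r * m + m ≤ m * m := by
    have h := Nat.mul_le_mul_right m (show r + 1 ≤ m by omega)
    rw [add_mul, one_mul] at h; exact h
  have hdrop : (PySem.List.pyRange 1 ((m * m : Nat) : Int) 1 ++ [0]).drop (r * m)
      = PySem.List.pyRange (1 + ((r * m : Nat) : Int)) ((m * m : Nat) : Int) 1 ++ [0] := by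
    rw [PySem.List.pyRange_one_append 1 (1 + ((r * m : Nat) : Int)) ((m * m : Nat) : Int) (by omega) (by omega),
      List.append_assoc]
    apply List.drop_left'
    rw [PySem.List.length_pyRange_one]; omega
  rw [hdrop]
  by_cases hr : m - 1 = r
  · subst hr
    rw [if_pos rfl]
    have hc : ((m - 1 : Nat) : Int) * (m : Int) = (((m - 1) * m : Nat) : Int) := by push_cast; ring
    have hkey : (m - 1) * m + m = m * m := by
      obtain ⟨s, rfl⟩ := Nat.exists_eq_add_of_le hm
      simp; ring
    have he : 1 + ((m - 1 : Nat) : Int) * (m : Int) + (m : Int) = ((m * m : Nat) : Int) + 1 := by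
      rw [hc]; omega
    rw [he, hc, PySem.List.pyRange_one_succ_right (by omega)]
    have hlenY : (PySem.List.pyRange (1 + (((m - 1) * m : Nat) : Int)) ((m * m : Nat) : Int) 1).length = m - 1 := by
      rw [PySem.List.length_pyRange_one]; omega
    rw [List.take_of_length_le (by simp [PySem.List.length_pyRange_one]; omega),
        List.set_append, hlenY, if_neg (by omega)]
    simp
  · -- interior row r < m - 1
    rw [if_neg hr]
    have hn2 : r * m + 2 * m ≤ m * m := by
      have h := Nat.mul_le_mul_right m (show r + 2 ≤ m by omega)
      rw [add_mul] at h; omega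
    rw [PySem.List.pyRange_one_append (1 + ((r * m : Nat) : Int)) (1 + ((r * m : Nat) : Int) + m) ((m * m : Nat) : Int) (by omega) (by omega),
      List.append_assoc]
    rw [List.take_left' (by
      rw [PySem.List.length_pyRange_one]
      have h : (1 + ((r * m : Nat) : Int) + m) - (1 + ((r * m : Nat) : Int)) = ((m : Nat) : Int) := by ring
      rw [h, Int.toNat_natCast])]

-- ===== VERDICT (by name: the statement is the Claim_ definition above) =====
theorem createSol_spec : Claim_equal_createSol := by
  intro n _ hpre
  unfold Spec_createSol
  have h : n = (n.toNat : Int) := by unfold Pre_createSol at hpre; omega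
  rw [h]
  exact main_eq n.toNat (by unfold Pre_createSol at hpre; omega)
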